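-- pv_equiv track=rewrite | github.com/vaishnavisagarjadhav/vityarthi_project_vaishnavi_25BAI11401 | icu_allocation.py | dfs_all_icu
-- ===== SOURCE A (Python) =====
-- graph = {
--     "Entrance": ["Ward_A", "Ward_B"],
--     "Ward_A": ["ICU_1", "ICU_2"],
--     "Ward_B": ["ICU_3"],
--     "ICU_1": [],
--     "ICU_2": [],
--     "ICU_3": []
-- }
--
-- icu_beds = {
--     "ICU_1": True,
--     "ICU_2": False,
--     "ICU_3": True
-- }
--
-- def dfs_all_icu(start, visited=None, path=None):
--     if visited is None:
--         visited = set()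
--     if path is None:
--         path = []
--
--     visited.add(start)
--     path.append(start)
--
--     results = []
--
--     if start in icu_beds and icu_beds[start]:
--         results.append((start, path.copy()))
--
--     for neighbor in graph[start]:
--         if neighbor not in visited:
--             results.extend(dfs_all_icu(neighbor, visited, path))
--
--     path.pop()
--     visited.remove(start)
--
--     return results
-- ===== SOURCE B (Python) =====
-- graph = {
--     "Entrance": ["Ward_A", "Ward_B"],
--     "Ward_A": ["ICU_1", "ICU_2"],
--     "Ward_B": ["ICU_3"],
--     "ICU_1": [],
--     "ICU_2": [],
--     "ICU_3": []
-- }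
--
-- icu_beds = {
--     "ICU_1": True,
--     "ICU_2": False,
--     "ICU_3": True
-- }
--
-- def dfs_all_icu(start, visited=None, path=None):
--     # Iterative DFS with an explicit stack of (node, newpath) frames.
--     # Does not mutate the caller's visited/path (return value equivalent to A).
--     forbidden = set() if visited is None else set(visited)
--     prefix = [] if path is None else list(path)
--     results = []
--     stack = [(start, [start])]
--     while stack:
--         node, newpath = stack.pop()
--         if icu_beds.get(node, False):
--             results.append((node, prefix + newpath))
--         for nb in reversed(graph[node]):
--             if nb not in forbidden and nb not in newpath:
--                 stack.append((nb, newpath + [nb]))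
--     return results
-- ===== Notes on version B (the rewrite author's own statement) =====
-- stated objective: alternative
-- what changed: Replaces A's recursive DFS (which mutates a shared visited set and path list, relying on caller-visible backtracking) with an iterative DFS over an explicit stack of (node, path) frames, pushing neighbours in reverse so the pre-order result order is preserved; B copies visited/path and mutates nothing.
import Mathlib
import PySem

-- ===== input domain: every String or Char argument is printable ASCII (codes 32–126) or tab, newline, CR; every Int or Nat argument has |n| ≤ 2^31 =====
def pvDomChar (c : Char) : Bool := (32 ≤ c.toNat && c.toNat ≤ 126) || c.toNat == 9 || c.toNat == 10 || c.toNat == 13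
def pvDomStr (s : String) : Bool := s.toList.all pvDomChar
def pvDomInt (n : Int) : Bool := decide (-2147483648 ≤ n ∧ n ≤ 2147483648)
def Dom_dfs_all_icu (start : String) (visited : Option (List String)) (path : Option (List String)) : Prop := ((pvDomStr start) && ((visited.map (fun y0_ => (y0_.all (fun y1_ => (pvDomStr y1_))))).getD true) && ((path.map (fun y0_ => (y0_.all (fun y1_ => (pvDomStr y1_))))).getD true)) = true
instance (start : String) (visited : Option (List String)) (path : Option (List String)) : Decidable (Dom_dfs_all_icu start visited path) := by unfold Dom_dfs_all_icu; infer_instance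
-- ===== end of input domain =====

-- B replaces A's recursive DFS by an iterative DFS over an explicit stack of
-- (node, path) frames (objective: alternative decomposition, same cost).
-- A mutates its caller's `visited`/`path` arguments (it restores `path`, and removes
-- `start` from `visited` if the caller passed it in); B copies them and mutates
-- nothing: the equivalence proved here is about the RETURN value only.

-- ===== PORT A =====
-- the module-level dicts
def pvGraph : PySem.Dict String (List String) := PySem.Dict.ofList
  [("Entrance", ["Ward_A", "Ward_B"]), ("Ward_A", ["ICU_1", "ICU_2"]),
   ("Ward_B", ["ICU_3"]), ("ICU_1", []), ("ICU_2", []), ("ICU_3", [])]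
def pvIcu : PySem.Dict String Bool := PySem.Dict.ofList
  [("ICU_1", true), ("ICU_2", false), ("ICU_3", true)]

-- A's recursion, with the mutation of `visited`/`path` made explicit: each call
-- `visited.add(start)`s / appends `start` to `path`, and the trailing
-- `path.pop()` / `visited.remove(start)` exactly undo that (a recursive call is
-- only made when its argument is not in `visited`), so after each recursive call
-- the loop sees the same `visited`/`path` it passed in; the port therefore
-- passes the updated set/path down unchanged across iterations.
-- `start in icu_beds and icu_beds[start]` is `getD pvIcu start false`;
-- `graph[start]` (KeyError when absent — excluded by Pre_) is ported as getD [].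
-- Recursion depth is bounded by the depth of the fixed 6-node acyclic graph, so
-- fuel 8 is never exhausted on inputs satisfying Pre_.
def pvDfsA : Nat → String → PySem.Set String → List String → List (String × List String)
  | 0, _, _, _ => []
  | fuel+1, start, visited, path =>
    let visited' := PySem.Set.add visited start
    let path' := path ++ [start]
    let results : List (String × List String) :=
      if PySem.Dict.getD pvIcu start false then [(start, path')] else []
    (PySem.Dict.getD pvGraph start []).foldl
      (fun acc n => if PySem.Set.contains visited' n then acc
                    else acc ++ pvDfsA fuel n visited' path') results

def dfs_all_icu (start : String) (visited : Option (List String)) (path : Option (List String)) : List (String × List String) :=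
  pvDfsA 8 start (visited.getD []) (path.getD [])

-- ===== PORT B =====
-- the while loop: the stack's TOP is the list HEAD (Python appends/pops at the
-- end; the inner `for nb in reversed(graph[node])` loop pushing one frame at a
-- time is the fold below, prepending, so pop order is identical).
-- The number of frames ever pushed is bounded by the number of simple paths in
-- the fixed 6-node graph, so fuel 32 is never exhausted on inputs satisfying Pre_.
def pvLoopB : Nat → PySem.Set String → List String → List (String × List String) → List (String × List String) → List (String × List String)
  | 0, _, _, _, acc => acc
  | fuel+1, forbidden, pre, stack, acc =>
    match stack with
    | [] => acc
    | (node, newpath) :: rest =>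
      let acc' := if PySem.Dict.getD pvIcu node false then acc ++ [(node, pre ++ newpath)] else acc
      let stack' := (PySem.Dict.getD pvGraph node []).reverse.foldl
        (fun st nb => if PySem.Set.contains forbidden nb || newpath.contains nb then st
                      else (nb, newpath ++ [nb]) :: st) rest
      pvLoopB fuel forbidden pre stack' acc'

def dfs_all_icu_alt (start : String) (visited : Option (List String)) (path : Option (List String)) : List (String × List String) :=
  let forbidden : PySem.Set String := PySem.Set.ofList (visited.getD [])
  let pre := path.getD []
  pvLoopB 32 forbidden pre [(start, [start])] []

-- ===== PRECONDITION & SPEC =====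
-- Pre_ excludes exactly the starts absent from `graph`, on which both Pythons raise KeyError.
def Pre_dfs_all_icu (start : String) (visited : Option (List String)) (path : Option (List String)) : Prop :=
  start ∈ ["Entrance", "Ward_A", "Ward_B", "ICU_1", "ICU_2", "ICU_3"]
instance (start : String) (visited : Option (List String)) (path : Option (List String)) : Decidable (Pre_dfs_all_icu start visited path) := by unfold Pre_dfs_all_icu; infer_instance
def pvWitness_dfs_all_icu : String × Option (List String) × Option (List String) := ("Entrance", none, none)

def Spec_dfs_all_icu (start : String) (visited : Option (List String)) (path : Option (List String)) (out : List (String × List String)) : Prop := out = dfs_all_icu_alt start visited path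
instance (start : String) (visited : Option (List String)) (path : Option (List String)) (out : List (String × List String)) : Decidable (Spec_dfs_all_icu start visited path out) := by unfold Spec_dfs_all_icu; infer_instance

-- ===== CLAIM (what is proved, stated in full; the proofs are below) =====
def Claim_equal_dfs_all_icu : Prop := ∀ (start : String) (visited : Option (List String)) (path : Option (List String)), Dom_dfs_all_icu start visited path → Pre_dfs_all_icu start visited path → Spec_dfs_all_icu start visited path (dfs_all_icu start visited path)

-- ===== LEMMAS AND PROOFS =====

-- the strings ever tested for membership in `visited`: the neighbour lists of pvGraph
def pvNames5 : List String := ["Ward_A", "Ward_B", "ICU_1", "ICU_2", "ICU_3"]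
-- prepending a path prefix to one result pair
def pvFmap (p : List String) : (String × List String) → (String × List String) :=
  fun r => (r.1, p ++ r.2)

theorem pv_contains_add (s : PySem.Set String) (a x : String) :
    (PySem.Set.add s a).contains x = (s.contains x || x == a) := by
  unfold PySem.Set.add
  split
  · rename_i h
    by_cases hx : x = a
    · subst hx; simp [PySem.Set.contains_eq_listContains] at h ⊢; simp [h]
    · simp [hx]
  · simp only [PySem.Set.contains_eq_listContains, List.contains_append, List.contains_cons,
      List.contains_nil, Bool.or_false]

theorem pv_contains_ofList (v : List String) (x : String) :
    (PySem.Set.ofList v).contains x = PySem.Set.contains v x := by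
  by_cases h : x ∈ v <;>
    simp [PySem.Set.contains_eq_listContains, PySem.Set.mem_ofList, h]

theorem pv_contains_filter (v : List String) (l : List String) (x : String) (hx : x ∈ l) :
    PySem.Set.contains (l.filter (fun y => PySem.Set.contains v y)) x = PySem.Set.contains v x := by
  cases h : PySem.Set.contains v x <;>
    simp_all [PySem.Set.contains_eq_listContains, List.mem_filter]

theorem pv_graph_mem (s : String) : ∀ n ∈ PySem.Dict.getD pvGraph s [], n ∈ pvNames5 := by
  intro n hn
  have hg : pvGraph = PySem.Dict.mk [("Entrance", ["Ward_A", "Ward_B"]), ("Ward_A", ["ICU_1", "ICU_2"]),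
      ("Ward_B", ["ICU_3"]), ("ICU_1", []), ("ICU_2", []), ("ICU_3", [])] := by decide
  rw [hg] at hn
  unfold PySem.Dict.getD at hn
  simp only [PySem.Dict.get?_mk_cons] at hn
  split_ifs at hn <;> simp_all [pvNames5] <;> tauto

theorem pv_dfsA_congr : ∀ (fuel : Nat) (s : String) (v w : PySem.Set String) (p : List String),
    (∀ x ∈ pvNames5, v.contains x = w.contains x) →
    pvDfsA fuel s v p = pvDfsA fuel s w p := by
  intro fuel
  induction fuel with
  | zero => intro s v w p _; rfl
  | succ fuel ih =>
    intro s v w p h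
    simp only [pvDfsA]
    apply PySem.List.foldl_congr_mem
    intro acc n hn
    have hn5 := pv_graph_mem s n hn
    have hc : (PySem.Set.add v s).contains n = (PySem.Set.add w s).contains n := by
      rw [pv_contains_add, pv_contains_add, h n hn5]
    rw [hc]
    have hadd : ∀ x ∈ pvNames5, (PySem.Set.add v s).contains x = (PySem.Set.add w s).contains x := by
      intro x hx; rw [pv_contains_add, pv_contains_add, h x hx]
    rw [ih n (PySem.Set.add v s) (PySem.Set.add w s) (p ++ [s]) hadd]

theorem pv_loopB_congr : ∀ (fuel : Nat) (f g : PySem.Set String) (pre : List String)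
    (stack : List (String × List String)) (acc : List (String × List String)),
    (∀ x ∈ pvNames5, f.contains x = g.contains x) →
    pvLoopB fuel f pre stack acc = pvLoopB fuel g pre stack acc := by
  intro fuel
  induction fuel with
  | zero => intro f g pre stack acc _; rfl
  | succ fuel ih =>
    intro f g pre stack acc h
    match stack with
    | [] => rfl
    | (node, newpath) :: rest =>
      simp only [pvLoopB]
      have hst : (PySem.Dict.getD pvGraph node []).reverse.foldl
          (fun st nb => if f.contains nb || newpath.contains nb then st
                        else (nb, newpath ++ [nb]) :: st) rest
          = (PySem.Dict.getD pvGraph node []).reverse.foldl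
          (fun st nb => if g.contains nb || newpath.contains nb then st
                        else (nb, newpath ++ [nb]) :: st) rest := by
        apply PySem.List.foldl_congr_mem
        intro st nb hnb
        rw [List.mem_reverse] at hnb
        rw [h nb (pv_graph_mem node nb hnb)]
      rw [hst]
      exact ih f g pre _ _ h

theorem pv_foldl_map (F : (String × List String) → (String × List String))
    (l : List String) (c : String → Bool) (g : String → List (String × List String)) :
    ∀ init, (List.foldl (fun acc n => if c n then acc else acc ++ g n) init l).map F
      = List.foldl (fun acc n => if c n then acc else acc ++ (g n).map F) (init.map F) l := by
  induction l with
  | nil => intro init; rfl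
  | cons n l ih =>
    intro init
    simp only [List.foldl_cons]
    cases hc : c n <;> simp only [Bool.false_eq_true, ↓reduceIte, List.map_append, ih]

theorem pv_dfsA_prefix : ∀ (fuel : Nat) (s : String) (v : PySem.Set String) (p : List String),
    pvDfsA fuel s v p = (pvDfsA fuel s v []).map (pvFmap p) := by
  intro fuel
  induction fuel with
  | zero => intro s v p; rfl
  | succ fuel ih =>
    intro s v p
    simp only [pvDfsA, List.nil_append]
    rw [pv_foldl_map]
    have hinit : (if PySem.Dict.getD pvIcu s false then [(s, [s])] else []).map (pvFmap p)
        = (if PySem.Dict.getD pvIcu s false then [(s, p ++ [s])] else []) := by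
      cases PySem.Dict.getD pvIcu s false <;> simp [pvFmap]
    rw [hinit]
    apply PySem.List.foldl_congr_mem
    intro acc n _
    have : (pvDfsA fuel n (PySem.Set.add v s) [s]).map (pvFmap p)
        = pvDfsA fuel n (PySem.Set.add v s) (p ++ [s]) := by
      rw [ih n (PySem.Set.add v s) [s], ih n (PySem.Set.add v s) (p ++ [s]), List.map_map]
      apply List.map_congr_left
      intro r _
      simp [pvFmap]
    rw [this]

theorem pv_loopB_acc : ∀ (fuel : Nat) (f : PySem.Set String) (pre : List String)
    (stack acc : List (String × List String)),
    pvLoopB fuel f pre stack acc = acc ++ pvLoopB fuel f pre stack [] := by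
  intro fuel
  induction fuel with
  | zero => intro f pre stack acc; simp [pvLoopB]
  | succ fuel ih =>
    intro f pre stack acc
    match stack with
    | [] => simp [pvLoopB]
    | (node, newpath) :: rest =>
      simp only [pvLoopB]
      cases hicu : PySem.Dict.getD pvIcu node false <;>
        simp only [Bool.false_eq_true, ↓reduceIte, List.nil_append]
      · exact ih f pre _ acc
      · rw [ih f pre _ (acc ++ [(node, pre ++ newpath)]), ih f pre _ [(node, pre ++ newpath)]]
        simp [List.append_assoc]

theorem pv_loopB_pre : ∀ (fuel : Nat) (f : PySem.Set String) (pre : List String)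
    (stack : List (String × List String)),
    pvLoopB fuel f pre stack [] = (pvLoopB fuel f [] stack []).map (pvFmap pre) := by
  intro fuel
  induction fuel with
  | zero => intro f pre stack; rfl
  | succ fuel ih =>
    intro f pre stack
    match stack with
    | [] => rfl
    | (node, newpath) :: rest =>
      simp only [pvLoopB, List.nil_append]
      cases hicu : PySem.Dict.getD pvIcu node false <;>
        simp only [Bool.false_eq_true, ↓reduceIte]
      · exact ih _ _ _
      · rw [pv_loopB_acc fuel f pre _ [(node, pre ++ newpath)],
            pv_loopB_acc fuel f [] _ [(node, newpath)], List.map_append, ih]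
        simp [pvFmap]

set_option maxHeartbeats 1000000 in
theorem pv_key : ∀ s ∈ ["Entrance", "Ward_A", "Ward_B", "ICU_1", "ICU_2", "ICU_3"], ∀ v : List String,
    pvDfsA 8 s v [] = pvLoopB 32 (PySem.Set.ofList v) [] [(s, [s])] [] := by
  intro s hs v
  have hA : ∀ x ∈ pvNames5, PySem.Set.contains v x
      = PySem.Set.contains (pvNames5.filter (fun y => PySem.Set.contains v y)) x :=
    fun x hx => (pv_contains_filter v pvNames5 x hx).symm
  have hB : ∀ x ∈ pvNames5, PySem.Set.contains (PySem.Set.ofList v) x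
      = PySem.Set.contains (pvNames5.filter (fun y => PySem.Set.contains v y)) x :=
    fun x hx => by rw [pv_contains_ofList, pv_contains_filter v pvNames5 x hx]
  rw [pv_dfsA_congr 8 s v _ [] hA, pv_loopB_congr 32 _ _ [] _ [] hB]
  cases h1 : PySem.Set.contains v "Ward_A" <;>
  cases h2 : PySem.Set.contains v "Ward_B" <;>
  cases h3 : PySem.Set.contains v "ICU_1" <;>
  cases h4 : PySem.Set.contains v "ICU_2" <;>
  cases h5 : PySem.Set.contains v "ICU_3" <;>
    simp only [pvNames5, List.filter_cons, List.filter_nil, h1, h2, h3, h4, h5,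
      Bool.false_eq_true, ↓reduceIte] <;>
    fin_cases hs <;> decide

-- ===== VERDICT (by name: the statement is the Claim_ definition above) =====
theorem dfs_all_icu_spec : Claim_equal_dfs_all_icu := by
  intro start visited path _ hpre
  unfold Spec_dfs_all_icu dfs_all_icu dfs_all_icu_alt
  rw [pv_dfsA_prefix, pv_loopB_pre]
  exact congrArg _ (pv_key start hpre (visited.getD []))
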